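-- pv_equiv track=rewrite | github.com/vabsalack/COMPETITIVE-CODING | CSE/CSE330/Dynamic_Programming/3.3_Nikita and the Game.py | arraySplitting
-- ===== SOURCE A (Python) =====
-- def arraySplitting(arr):
--     # Write your code here
--     running_sum = 0
--     dic = {}
--
--     for i in range(len(arr)):
--         running_sum += arr[i]
--         dic[running_sum] = i + 1
--
--     if running_sum == 0:
--         return len(arr) - 1
--
--     elif running_sum % 2 == 0 and running_sum // 2 in dic:
--
--         split1 = arraySplitting(arr[:dic[running_sum // 2]])
--         split2 = arraySplitting(arr[dic[running_sum // 2]:])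
--
--         return max(split1, split2) + 1
--     else:
--         return 0
-- ===== SOURCE B (Python) =====
-- def arraySplitting(arr):
--     # Global prefix sums once; recurse over index ranges, scanning backwards
--     # for the last prefix equal to the midpoint -- no per-call dict or slicing.
--     n = len(arr)
--     P = [0] * (n + 1)
--     for i in range(n):
--         P[i + 1] = P[i] + arr[i]
--
--     def rec(l, r):
--         s = P[r] - P[l]
--         if s == 0:
--             return r - l - 1
--         if s % 2 != 0:
--             return 0
--         t = P[l] + s // 2
--         m = r - 1
--         while m > l and P[m] != t:
--             m -= 1
--         if m == l:
--             return 0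
--         return max(rec(l, m), rec(m, r)) + 1
--
--     return rec(0, n)
-- ===== Notes on version B (the rewrite author's own statement) =====
-- stated objective: faster
-- what changed: B computes one global prefix-sum array up front and recurses over index ranges (l, r), finding the split point by a backward scan over prefix sums, instead of A's rebuilding a running-sum dict and copying two list slices in every recursive call.
import Mathlib
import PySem

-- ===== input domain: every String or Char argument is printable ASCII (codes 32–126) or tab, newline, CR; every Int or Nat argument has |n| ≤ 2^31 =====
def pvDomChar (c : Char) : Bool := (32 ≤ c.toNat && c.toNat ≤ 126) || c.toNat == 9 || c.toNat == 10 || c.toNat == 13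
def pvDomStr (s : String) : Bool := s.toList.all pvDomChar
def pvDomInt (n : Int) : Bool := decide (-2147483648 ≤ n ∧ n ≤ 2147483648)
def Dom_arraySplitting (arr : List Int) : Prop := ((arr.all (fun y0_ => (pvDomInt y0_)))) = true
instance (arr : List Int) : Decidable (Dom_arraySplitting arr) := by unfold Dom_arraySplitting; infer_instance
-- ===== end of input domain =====

-- B replaces A's per-call dict rebuild and list slicing by one global prefix-sum
-- list and recursion over index ranges with a backward scan for the split point
-- (objective: faster by a constant factor; same return value on every input).

-- ===== PORT A =====
-- A's 'for i in range(len(arr)): running_sum += arr[i]; dic[running_sum] = i + 1'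
def pvBuild (xs : List Int) : Int × PySem.Dict Int Int :=
  (PySem.List.enumerate xs 0).foldl
    (fun (st : Int × PySem.Dict Int Int) p => (st.1 + p.2, st.2.insert (st.1 + p.2) (p.1 + 1)))
    (0, PySem.Dict.empty)

-- fuel makes the recursion structural; arr.length + 1 is always enough, since in
-- the recursive branch both slices are strictly shorter than arr
def arraySplittingA : Nat → List Int → Int
  | 0, _ => 0
  | fuel + 1, arr =>
    let st := pvBuild arr
    if st.1 = 0 then (arr.length : Int) - 1
    else if PySem.Int.mod st.1 2 = 0 then
      match st.2.get? (PySem.Int.floordiv st.1 2) with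
      | some j =>
        let split1 := arraySplittingA fuel (PySem.List.slice arr none (some j))
        let split2 := arraySplittingA fuel (PySem.List.slice arr (some j) none)
        max split1 split2 + 1
      | none => 0
    else 0

def arraySplitting (arr : List Int) : Int := arraySplittingA (arr.length + 1) arr

-- ===== PORT B =====
-- Source B's first loop: P[i + 1] = P[i] + arr[i]
def pvPrefix (arr : List Int) : List Int :=
  (arr.foldl (fun (st : List Int × Int) x => (st.1 ++ [st.2 + x], st.2 + x)) ([0], 0)).1

-- Source B's 'while m > l and P[m] != t: m -= 1'
def pvScan (P : List Int) (t : Int) (l : Nat) : Nat → Nat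
  | 0 => 0
  | m + 1 => if l < m + 1 ∧ P.getD (m + 1) 0 ≠ t then pvScan P t l m else m + 1

-- Source B's rec(l, r); fuel arr.length + 1 is always enough (each call shrinks r - l)
def pvRec (P : List Int) : Nat → Nat → Nat → Int
  | 0, _, _ => 0
  | fuel + 1, l, r =>
    let s := P.getD r 0 - P.getD l 0
    if s = 0 then (r : Int) - (l : Int) - 1
    else if PySem.Int.mod s 2 ≠ 0 then 0
    else
      let t := P.getD l 0 + PySem.Int.floordiv s 2
      let m := pvScan P t l (r - 1)
      if m = l then 0
      else max (pvRec P fuel l m) (pvRec P fuel m r) + 1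

def arraySplitting_alt (arr : List Int) : Int :=
  pvRec (pvPrefix arr) (arr.length + 1) 0 arr.length

-- ===== PRECONDITION & SPEC =====
def Spec_arraySplitting (arr : List Int) (out : Int) : Prop := out = arraySplitting_alt arr
instance (arr : List Int) (out : Int) : Decidable (Spec_arraySplitting arr out) := by unfold Spec_arraySplitting; infer_instance

-- ===== CLAIM (what is proved, stated in full; the proofs are below) =====
def Claim_equal_arraySplitting : Prop := ∀ (arr : List Int), Dom_arraySplitting arr → Spec_arraySplitting arr (arraySplitting arr)

-- ===== LEMMAS AND PROOFS =====

-- find? congruence (predicates agreeing on members)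
theorem pv_find?_congr {α : Type} (L : List α) (p q : α → Bool)
    (h : ∀ a ∈ L, p a = q a) : L.find? p = L.find? q := by
  induction L with
  | nil => rfl
  | cons x xs ih =>
    simp only [List.find?]
    rw [h x (by simp)]
    cases q x with
    | true => rfl
    | false => exact ih (fun a ha => h a (by simp [ha]))

-- pvPrefix's fold yields the list of prefix sums together with the total
theorem pvPrefix_state (arr : List Int) :
    arr.foldl (fun (st : List Int × Int) x => (st.1 ++ [st.2 + x], st.2 + x)) ([0], 0)
      = ((List.range (arr.length + 1)).map (fun i => ((arr.take i).sum : Int)), arr.sum) := by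
  induction arr using List.reverseRecOn with
  | nil => simp
  | append_singleton xs x ih =>
    rw [List.foldl_append, ih]
    simp only [List.foldl_cons, List.foldl_nil]
    refine Prod.ext ?_ (by simp)
    show _ ++ [xs.sum + x] = _
    symm
    rw [List.length_append, List.length_singleton, List.range_succ, List.map_append]
    dsimp only [List.map_cons, List.map_nil]
    congr 1
    · apply List.map_congr_left
      intro i hi
      simp only [List.mem_range] at hi
      rw [List.take_append_of_le_length (by omega)]
    · rw [List.take_of_length_le (by simp)]
      simp

theorem pvPrefix_getD (arr : List Int) (i : Nat) (hi : i ≤ arr.length) :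
    (pvPrefix arr).getD i 0 = (arr.take i).sum := by
  unfold pvPrefix
  rw [pvPrefix_state]
  show (List.map _ _).getD i 0 = _
  rw [List.getD_eq_getElem?_getD, List.getElem?_map, List.getElem?_range (by omega)]
  rfl

-- pvScan finds the greatest position in (l, m] whose prefix equals t, else l
theorem pvScan_spec (P : List Int) (t : Int) (l : Nat) : ∀ (m : Nat), l ≤ m →
    pvScan P t l m
      = ((List.range' (l + 1) (m - l)).reverse.find? (fun j => P.getD j 0 == t)).getD l := by
  intro m
  induction m with
  | zero =>
    intro h
    have : l = 0 := by omega
    subst this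
    simp [pvScan]
  | succ m ih =>
    intro h
    by_cases hl : l = m + 1
    · subst hl
      simp [pvScan]
    · have hlm : l ≤ m := by omega
      have hmm : m + 1 - l = (m - l) + 1 := by omega
      rw [hmm, List.range'_concat]
      have hs : l + 1 + 1 * (m - l) = m + 1 := by omega
      rw [hs, List.reverse_append, List.reverse_singleton, List.singleton_append,
        List.find?_cons]
      by_cases hp : P.getD (m + 1) 0 = t
      · have hb : (P.getD (m + 1) 0 == t) = true := by rw [beq_iff_eq]; simpa [List.getD] using hp
        rw [hb]
        have : ¬ (l < m + 1 ∧ P.getD (m + 1) 0 ≠ t) := by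
          intro hc
          exact hc.2 hp
        rw [pvScan, if_neg this]
        rfl
      · have hb : (P.getD (m + 1) 0 == t) = false := by rw [beq_eq_false_iff_ne]; simpa [List.getD] using hp
        rw [hb]
        have hc : l < m + 1 ∧ P.getD (m + 1) 0 ≠ t := ⟨by omega, hp⟩
        rw [pvScan, if_pos hc]
        exact ih hlm

theorem pvBuild_append (xs : List Int) (x : Int) :
    pvBuild (xs ++ [x])
      = ((pvBuild xs).1 + x,
         (pvBuild xs).2.insert ((pvBuild xs).1 + x) ((xs.length : Int) + 1)) := by
  unfold pvBuild
  rw [PySem.List.enumerate_append, List.foldl_append]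
  simp [PySem.List.enumerate]

theorem pvBuild_fst (xs : List Int) : (pvBuild xs).1 = xs.sum := by
  induction xs using List.reverseRecOn with
  | nil => rfl
  | append_singleton xs x ih => rw [pvBuild_append]; simp [ih]

-- A's dict lookup is: last prefix position of xs whose running sum equals k
theorem pvBuild_get? (xs : List Int) (k : Int) :
    (pvBuild xs).2.get? k
      = ((List.range' 1 xs.length).reverse.find? (fun j => ((xs.take j).sum : Int) == k)).map
          (fun j => (j : Int)) := by
  induction xs using List.reverseRecOn generalizing k with
  | nil => simp [pvBuild, PySem.List.enumerate]
  | append_singleton xs x ih =>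
    rw [pvBuild_append, pvBuild_fst]
    rw [PySem.Dict.get?_insert]
    rw [List.length_append, List.length_singleton, List.range'_concat]
    have hs : 1 + 1 * xs.length = xs.length + 1 := by omega
    rw [hs, List.reverse_append, List.reverse_singleton, List.singleton_append, List.find?_cons]
    have htake : (xs ++ [x]).take (xs.length + 1) = xs ++ [x] := by
      apply List.take_of_length_le; simp
    by_cases hk : k = xs.sum + x
    · have hb : (((xs ++ [x]).take (xs.length + 1)).sum == k) = true := by
        rw [beq_iff_eq, htake]; simp [hk]
      rw [hb]
      simp [hk]
    · have hb : (((xs ++ [x]).take (xs.length + 1)).sum == k) = false := by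
        rw [beq_eq_false_iff_ne, htake]; simp; omega
      rw [hb, if_neg hk]
      rw [ih k]
      have hfind : (List.range' 1 xs.length).reverse.find? (fun j => ((xs.take j).sum : Int) == k)
          = (List.range' 1 xs.length).reverse.find? (fun j => (((xs ++ [x]).take j).sum : Int) == k) := by
        apply pv_find?_congr
        intro j hj
        simp only [List.mem_reverse, List.mem_range'] at hj
        obtain ⟨i, hi, rfl⟩ := hj
        rw [List.take_append_of_le_length (by omega)]
      rw [hfind]

-- main correspondence: A on the slice arr[l:r] equals B's rec(l, r)
theorem pv_main : ∀ (fuel : Nat) (arr : List Int) (l r : Nat), l ≤ r → r ≤ arr.length →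
    arraySplittingA fuel ((arr.drop l).take (r - l)) = pvRec (pvPrefix arr) fuel l r := by
  intro fuel
  induction fuel with
  | zero => intro arr l r _ _; rfl
  | succ fuel ih =>
    intro arr l r hlr hr
    set xs := (arr.drop l).take (r - l) with hxs
    have hlen : xs.length = r - l := by
      rw [hxs]; simp; omega
    have hdecomp : arr.take l ++ xs = arr.take r := by
      rw [hxs, ← List.take_add, Nat.add_sub_cancel' hlr]
    have hsum : (arr.take l).sum + xs.sum = (arr.take r).sum := by
      have h := congrArg List.sum hdecomp
      simpa using h
    have hPl : (pvPrefix arr).getD l 0 = (arr.take l).sum := pvPrefix_getD arr l (by omega)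
    have hPr : (pvPrefix arr).getD r 0 = (arr.take r).sum := pvPrefix_getD arr r hr
    have hs' : (pvPrefix arr).getD r 0 - (pvPrefix arr).getD l 0 = xs.sum := by
      rw [hPl, hPr]; omega
    have hsub : ∀ j, j ≤ r - l → (arr.take (l + j)).sum = (arr.take l).sum + (xs.take j).sum := by
      intro j hj
      have h1 : arr.take (l + j) = arr.take l ++ (arr.drop l).take j := List.take_add
      have h2 : xs.take j = (arr.drop l).take j := by
        rw [hxs, List.take_take]; congr 1; omega
      rw [h1, List.sum_append, h2]
    simp only [arraySplittingA, pvRec]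
    rw [pvBuild_fst, hs']
    by_cases h0 : xs.sum = 0
    · rw [if_pos h0, if_pos h0, hlen]
      push_cast [Nat.cast_sub hlr]
      ring
    · rw [if_neg h0, if_neg h0]
      have hlr' : l < r := by
        rcases Nat.lt_or_ge l r with h | h
        · exact h
        · exfalso
          apply h0
          have : r - l = 0 := by omega
          rw [hxs, this]
          simp
      by_cases hm : PySem.Int.mod xs.sum 2 = 0
      · rw [if_pos hm, if_neg (by simpa using hm)]
        rw [pvBuild_get?, hlen]
        have hn : r - l = (r - l - 1) + 1 := by omega
        rw [hn, List.range'_concat,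
          show 1 + 1 * (r - l - 1) = r - l from by omega,
          List.reverse_append, List.reverse_singleton, List.singleton_append, List.find?_cons]
        have hq : 2 * PySem.Int.floordiv xs.sum 2 = xs.sum := by
          have h1 := PySem.Int.floordiv_mul_add_mod xs.sum 2
          omega
        have hxx : xs.take (r - l) = xs := by
          apply List.take_of_length_le; omega
        have hne : (((xs.take (r - l)).sum : Int) == PySem.Int.floordiv xs.sum 2) = false := by
          rw [beq_eq_false_iff_ne, hxx]
          intro he
          exact h0 (by omega)
        rw [hne]
        rw [pvScan_spec (pvPrefix arr) _ l (r - 1) (by omega),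
          show r - 1 - l = r - l - 1 from by omega]
        rw [List.range'_eq_map_range (s := 1) (n := r - l - 1),
          List.range'_eq_map_range (s := l + 1) (n := r - l - 1),
          ← List.map_reverse, ← List.map_reverse, List.find?_map, List.find?_map]
        have hpred : ∀ i ∈ (List.range (r - l - 1)).reverse,
            ((fun j => (pvPrefix arr).getD j 0 ==
                (pvPrefix arr).getD l 0 + PySem.Int.floordiv xs.sum 2) ∘ (fun i => l + 1 + i)) i
            = ((fun j => ((xs.take j).sum : Int) == PySem.Int.floordiv xs.sum 2) ∘ (fun i => 1 + i)) i := by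
          intro i hi
          simp only [List.mem_reverse, List.mem_range] at hi
          simp only [Function.comp_apply]
          have hP : (pvPrefix arr).getD (l + 1 + i) 0 = (arr.take (l + (1 + i))).sum := by
            rw [show l + 1 + i = l + (1 + i) from by omega]
            exact pvPrefix_getD arr _ (by omega)
          have hsb := hsub (1 + i) (by omega)
          rw [Bool.eq_iff_iff]
          simp only [beq_iff_eq]
          rw [hP, hPl]
          omega
        rw [pv_find?_congr _ _ _ hpred]
        cases hfind : (List.range (r - l - 1)).reverse.find?
            ((fun j => ((xs.take j).sum : Int) == PySem.Int.floordiv xs.sum 2) ∘ (fun i => 1 + i)) with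
        | none => simp
        | some i =>
          have hi_mem : i ∈ (List.range (r - l - 1)).reverse := List.mem_of_find?_eq_some hfind
          have hilt : i < r - l - 1 := by
            simpa [List.mem_reverse, List.mem_range] using hi_mem
          simp only [Option.map_some, Option.getD_some]
          rw [if_neg (by omega : ¬ l + 1 + i = l)]
          show max (arraySplittingA fuel (PySem.List.slice xs none (some ((1 + i : Nat) : Int))))
              (arraySplittingA fuel (PySem.List.slice xs (some ((1 + i : Nat) : Int)) none)) + 1 = _
          rw [PySem.List.slice_to_natCast, PySem.List.slice_from_natCast]
          have e1 : xs.take (1 + i) = (arr.drop l).take ((l + 1 + i) - l) := by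
            rw [hxs, List.take_take]; congr 1; omega
          have e2 : xs.drop (1 + i) = (arr.drop (l + 1 + i)).take (r - (l + 1 + i)) := by
            rw [hxs, List.drop_take, List.drop_drop,
              show l + (1 + i) = l + 1 + i from by omega,
              show r - l - (1 + i) = r - (l + 1 + i) from by omega]
          rw [e1, e2]
          rw [ih arr l (l + 1 + i) (by omega) (by omega),
            ih arr (l + 1 + i) r (by omega) hr]
      · rw [if_neg hm, if_pos (by simpa using hm)]

-- ===== VERDICT (by name: the statement is the Claim_ definition above) =====
theorem arraySplitting_spec : Claim_equal_arraySplitting := by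
  intro arr _
  unfold Spec_arraySplitting arraySplitting arraySplitting_alt
  have h := pv_main (arr.length + 1) arr 0 arr.length (Nat.zero_le _) (le_refl _)
  simpa using h
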